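-- pv_equiv track=rewrite | github.com/jgolison/2800 | 2800project.py | covers
-- ===== SOURCE A (Python) =====
-- import itertools
--
-- def covers(worddict):
--     # itertools easily allows combination calculating of a fixed length
--     combos = list(itertools.combinations(worddict, 3))
--     covers_list = []
--     # this loop creates the actual covers expression
--     for word_combo in combos:
--         str = ""
--         for word in word_combo:
--             str = str + word + "-"
--         str = str + "covers"
--         covers_list.append(str)
--     # since having both the list of combinations and the covers expression
--     # are helpful later, we return both
--     return covers_list, combos
-- ===== SOURCE B (Python) =====
-- def covers(worddict):
--     # One reverse pass of dynamic programming: for the current suffix of the key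
--     # list we maintain all its 1-, 2- and 3-element combinations; prepending a
--     # word w adds the triples (w, b, c) for each suffix pair (b, c), the pairs
--     # (w, x) for each suffix single x, and w itself.  Prepending keeps
--     # itertools' index-lexicographic order.
--     singles, pairs, triples = [], [], []
--     for w in reversed(list(worddict)):
--         triples = [(w, b, c) for (b, c) in pairs] + triples
--         pairs = [(w, x) for x in singles] + pairs
--         singles = [w] + singles
--     covers_list = [f"{a}-{b}-{c}-covers" for (a, b, c) in triples]
--     return covers_list, triples
-- ===== Notes on version B (the rewrite author's own statement) =====
-- stated objective: alternative
-- what changed: Replaces itertools.combinations plus a string-accumulating double loop with a single reverse-pass dynamic programming loop that maintains the suffix's 1-, 2- and 3-element combinations and prepends the new word's contributions, then formats each cover string in one comprehension.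
import Mathlib
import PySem

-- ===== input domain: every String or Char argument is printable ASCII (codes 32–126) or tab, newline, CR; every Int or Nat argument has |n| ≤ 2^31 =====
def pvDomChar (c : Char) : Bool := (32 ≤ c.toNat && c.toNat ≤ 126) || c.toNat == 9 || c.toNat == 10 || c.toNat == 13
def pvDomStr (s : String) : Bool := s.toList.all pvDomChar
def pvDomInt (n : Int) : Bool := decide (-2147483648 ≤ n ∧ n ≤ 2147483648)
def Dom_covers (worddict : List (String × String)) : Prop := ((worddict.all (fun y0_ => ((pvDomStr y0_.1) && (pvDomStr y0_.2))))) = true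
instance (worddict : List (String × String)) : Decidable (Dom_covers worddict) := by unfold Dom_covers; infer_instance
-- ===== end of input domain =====

-- B replaces itertools.combinations + a string-accumulating double loop with a single
-- reverse-pass DP maintaining the suffix's 1-/2-/3-element combinations plus one
-- formatting comprehension; objective: alternative (same cost).


-- ===== PORT A =====
-- iterating a Python dict yields its distinct keys in first-insertion order =
-- PySem.List.dedup of the association list's keys
-- combinations of a dict yields 3-tuples of keys; Lean's triples are built by
-- pvTriple ([a,b,c] ↦ (a,b,c)), a pure representation conversion: every member of
-- 'combinations keys 3' has length 3
def pvTriple (l : List String) : String × String × String :=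
  match l with
  | [a, b, c] => (a, b, c)
  | _ => ("", "", "")

def covers (worddict : List (String × String)) : List String × (List (String × String × String)) :=
  let keys := PySem.List.dedup (worddict.map (·.1))
  let combos := PySem.List.combinations keys 3
  let covers_list := combos.foldl (fun acc word_combo =>
    acc ++ [(word_combo.foldl (fun s word => s ++ word ++ "-") "") ++ "covers"]) []
  (covers_list, combos.map pvTriple)

-- ===== PORT B =====
-- one step of the reverse-pass DP: prepend word w to the state (singles, pairs, triples)
def pvStep (st : List String × List (String × String) × List (String × String × String))
    (w : String) : List String × List (String × String) × List (String × String × String) :=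
  let (singles, pairs, triples) := st
  (w :: singles,
   singles.map (fun x => (w, x)) ++ pairs,
   pairs.map (fun bc => (w, bc.1, bc.2)) ++ triples)

def covers_alt (worddict : List (String × String)) : List String × (List (String × String × String)) :=
  let words := PySem.List.dedup (worddict.map (·.1))
  let st := words.reverse.foldl pvStep ([], [], [])
  let triples := st.2.2
  let covers_list := triples.map (fun t => t.1 ++ "-" ++ t.2.1 ++ "-" ++ t.2.2 ++ "-covers")
  (covers_list, triples)

-- ===== PRECONDITION & SPEC =====
def Spec_covers (worddict : List (String × String)) (out : List String × (List (String × String × String))) : Prop := out = covers_alt worddict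
instance (worddict : List (String × String)) (out : List String × (List (String × String × String))) : Decidable (Spec_covers worddict out) := by unfold Spec_covers; infer_instance

-- ===== CLAIM (what is proved, stated in full; the proofs are below) =====
def Claim_equal_covers : Prop := ∀ (worddict : List (String × String)), Dom_covers worddict → Spec_covers worddict (covers worddict)

-- ===== LEMMAS AND PROOFS =====

def pvPair (l : List String) : String × String :=
  match l with
  | [a, b] => (a, b)
  | _ => ("", "")

-- proof-side recursive specifications of B's DP state components
def pairsB (ws : List String) : List (String × String) :=
  match ws with
  | [] => []
  | head :: rest => rest.map (fun c => (head, c)) ++ pairsB rest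

def triplesB (ws : List String) : List (String × String × String) :=
  match ws with
  | [] => []
  | head :: rest => (pairsB rest).map (fun bc => (head, bc.1, bc.2)) ++ triplesB rest

theorem foldl_pvStep_eq (ws : List String) :
    ws.reverse.foldl pvStep ([], [], []) = (ws, pairsB ws, triplesB ws) := by
  induction ws with
  | nil => simp [pairsB, triplesB]
  | cons a rest ih =>
      simp only [List.reverse_cons, List.foldl_append, ih, List.foldl_cons, List.foldl_nil]
      simp [pvStep, pairsB, triplesB]

theorem pairsB_eq (ws : List String) :
    pairsB ws = (PySem.List.combinations ws 2).map pvPair := by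
  induction ws with
  | nil => simp [pairsB, PySem.List.combinations_nil_succ]
  | cons h rest ih =>
      simp [pairsB, PySem.List.combinations_cons_succ, PySem.List.combinations_one,
        ih, List.map_map, Function.comp, pvPair]

theorem triplesB_eq (ws : List String) :
    triplesB ws = (PySem.List.combinations ws 3).map pvTriple := by
  induction ws with
  | nil => simp [triplesB, PySem.List.combinations_nil_succ]
  | cons h rest ih =>
      simp only [triplesB, PySem.List.combinations_cons_succ, List.map_append,
        List.map_map, ih, pairsB_eq]
      congr 1
      apply List.map_congr_left
      intro l hl
      have hlen := PySem.List.length_of_mem_combinations hl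
      match l, hlen with
      | [a, b], _ => simp [pvPair, pvTriple]

-- ===== VERDICT (by name: the statement is the Claim_ definition above) =====
theorem covers_spec : Claim_equal_covers := by
  intro worddict _
  unfold Spec_covers covers covers_alt
  simp only [PySem.List.foldl_append_singleton_eq_map, List.nil_append,
    foldl_pvStep_eq, triplesB_eq, List.map_map]
  refine Prod.ext ?_ rfl
  · apply List.map_congr_left
    intro l hl
    have hlen := PySem.List.length_of_mem_combinations hl
    match l, hlen with
    | [a, b, c], _ =>
        simp only [List.foldl, Function.comp, pvTriple]
        simp [String.append_assoc]
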